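-- pv_equiv track=rewrite | github.com/swaroop-smilecode/patterns_in_algorithm_problems | two_pointes/p01_token_replace/p01_token_replace.py | token_replace
-- ===== SOURCE A (Python) =====
-- def token_replace(s, tokens):
--     output = []
--     i = 0
--     j = 1
--     while i < len(s):
--         if s[i] != '$':
--             output += s[i]
--             i += 1
--             j = i + 1
--         elif s[j] != '$':
--             j += 1
--         else:
--             key = s[i: j + 1]
--             output.append(tokens[key])
--             i = j + 1
--             j = i + 1
--     return ''.join(output)
-- ===== SOURCE B (Python) =====
-- def token_replace(s, tokens):
--     segments = s.split('$')
--     out = [segments[0]]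
--     k = 1
--     while k < len(segments):
--         tail = segments[k + 1]
--         out.append(tokens['$' + segments[k] + '$'])
--         out.append(tail)
--         k += 2
--     return ''.join(out)
-- ===== Notes on version B (the rewrite author's own statement) =====
-- stated objective: idiomatic
-- what changed: Replaces A's char-by-char two-pointer index scan with split('$') into segments, a single loop over the odd-indexed segments doing dict lookups, and one final join.
import Mathlib
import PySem

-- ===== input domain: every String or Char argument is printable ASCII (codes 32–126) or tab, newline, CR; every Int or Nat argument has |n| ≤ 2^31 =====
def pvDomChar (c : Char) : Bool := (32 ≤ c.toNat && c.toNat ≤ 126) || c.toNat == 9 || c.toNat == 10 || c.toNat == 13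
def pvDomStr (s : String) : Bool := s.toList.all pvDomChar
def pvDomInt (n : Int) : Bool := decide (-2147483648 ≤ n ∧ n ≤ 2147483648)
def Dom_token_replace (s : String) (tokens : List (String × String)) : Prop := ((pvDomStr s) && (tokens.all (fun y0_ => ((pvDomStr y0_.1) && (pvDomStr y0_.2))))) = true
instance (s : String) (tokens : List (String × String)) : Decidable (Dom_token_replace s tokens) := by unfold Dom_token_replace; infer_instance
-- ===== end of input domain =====

-- B replaces A's char-by-char two-pointer scan by split('$') / join segment processing (idiomatic, measured constant-factor faster in Python).

-- tokens[key]: Python raises KeyError when the key is absent (such inputs are excluded by Pre_);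
-- the "" default is only ever returned outside Pre_.
def tokLookup (d : PySem.Dict String String) (key : List Char) : List Char :=
  (d.getD (String.ofList key) "").toList

-- ===== PORT A =====
-- A's while loop; i, j stay non-negative in Python so Nat indices are exact, and the
-- bound checks `hi`/`hj` are exactly Python's `i < len(s)` guard and the IndexError of s[j]
-- (an IndexError input is excluded by Pre_; the port returns the output so far there).
def tokenLoop (cs : List Char) (d : PySem.Dict String String)
    (output : List (List Char)) (i j : Nat) (hij : i < j) : List (List Char) :=
  if hi : i < cs.length then
    if cs[i] ≠ '$' then
      tokenLoop cs d (output ++ [[cs[i]]]) (i + 1) ((i + 1) + 1) (by omega)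
    else if hj : j < cs.length then
      if cs[j] ≠ '$' then
        tokenLoop cs d output i (j + 1) (by omega)
      else
        tokenLoop cs d
          (output ++ [tokLookup d (PySem.List.slice cs (some (i : Int)) (some ((j : Int) + 1)))])
          (j + 1) ((j + 1) + 1) (by omega)
    else output  -- Python: IndexError on s[j] (outside Pre_)
  else output
termination_by (cs.length - i, cs.length - j)
decreasing_by
  · exact Prod.Lex.left _ _ (by omega)
  · exact Prod.Lex.right _ (by omega)
  · exact Prod.Lex.left _ _ (by omega)

def token_replace (s : String) (tokens : List (String × String)) : String :=
  let d := PySem.Dict.ofList tokens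
  String.ofList (PySem.Chars.join [] (tokenLoop s.toList d [] 0 1 (by omega)))

-- ===== PORT B =====
-- Source B's while loop over k = 1, 3, 5, …; segments[k+1] is fetched first (tail), exactly as in Source B.
-- k, k+1 are in range inside Pre_; the getD defaults are only reached outside Pre_ (Python: IndexError).
def altLoop (segs : List (List Char)) (d : PySem.Dict String String)
    (out : List (List Char)) (k : Nat) : List (List Char) :=
  if k < segs.length then
    let tail := segs.getD (k + 1) []
    altLoop segs d (out ++ [tokLookup d ('$' :: segs.getD k [] ++ ['$']), tail]) (k + 2)
  else out
termination_by segs.length - k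

def token_replace_alt (s : String) (tokens : List (String × String)) : String :=
  let d := PySem.Dict.ofList tokens
  let segs := PySem.Chars.splitOn s.toList ['$']
  String.ofList (PySem.Chars.join [] (altLoop segs d [segs.getD 0 []] 1))

-- ===== PRECONDITION & SPEC =====
-- Exactly the inputs on which the Python A returns normally: every '$' that opens a token is
-- closed (an odd number of split segments, i.e. an even number of '$'; otherwise IndexError),
-- and every token key appears in the dict (otherwise KeyError).
def Pre_token_replace (s : String) (tokens : List (String × String)) : Prop :=
  (PySem.Chars.splitOn s.toList ['$']).length % 2 = 1 ∧
  ∀ k < (PySem.Chars.splitOn s.toList ['$']).length, k % 2 = 1 →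
    (PySem.Dict.ofList tokens).contains
      (String.ofList ('$' :: (PySem.Chars.splitOn s.toList ['$']).getD k [] ++ ['$'])) = true
instance (s : String) (tokens : List (String × String)) : Decidable (Pre_token_replace s tokens) := by unfold Pre_token_replace; infer_instance

def pvWitness_token_replace : String × (List (String × String)) :=
  ("a $x$ b", [("$x$", "X"), ("$y$", "Y")])

def Spec_token_replace (s : String) (tokens : List (String × String)) (out : String) : Prop := out = token_replace_alt s tokens
instance (s : String) (tokens : List (String × String)) (out : String) : Decidable (Spec_token_replace s tokens out) := by unfold Spec_token_replace; infer_instance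

-- ===== CLAIM (what is proved, stated in full; the proofs are below) =====
def Claim_equal_token_replace : Prop := ∀ (s : String) (tokens : List (String × String)), Dom_token_replace s tokens → Pre_token_replace s tokens → Spec_token_replace s tokens (token_replace s tokens)

-- ===== LEMMAS AND PROOFS =====

-- Simple structural recursion computing s.split('$'); both ports are related to it.
def mySplit : List Char → List (List Char)
  | [] => [[]]
  | c :: rest => if c = '$' then [] :: mySplit rest else (mySplit rest).modifyHead (c :: ·)

theorem mySplit_ne_nil (l : List Char) : mySplit l ≠ [] := by
  induction l with
  | nil => simp [mySplit]
  | cons c rest ih =>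
    simp only [mySplit]
    split_ifs
    · simp
    · cases h : mySplit rest with
      | nil => exact absurd h ih
      | cons a t => simp

theorem splitOn_go_spec (cs : List Char) : ∀ (fuel : Nat) (cur : List Char) (acc : List (List Char)),
    cs.length < fuel →
    PySem.Chars.splitOn.go ['$'] fuel cs cur acc
      = acc.reverse ++ (mySplit cs).modifyHead (cur.reverse ++ ·) := by
  induction cs with
  | nil =>
    intro fuel cur acc hf
    cases fuel with
    | zero => omega
    | succ f => rw [PySem.Chars.splitOn.go.eq_def]; simp [mySplit]
  | cons c rest ih =>
    intro fuel cur acc hf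
    cases fuel with
    | zero => simp at hf
    | succ f =>
      rw [PySem.Chars.splitOn.go.eq_def]
      by_cases hc : c = '$'
      · subst hc
        have hpre : List.isPrefixOf ['$'] ('$' :: rest) = true := by simp [List.isPrefixOf]
        simp only [hpre, if_true, List.length_cons, List.length_nil, List.drop_succ_cons,
          List.drop_zero]
        rw [ih f [] (List.reverse cur :: acc) (by simpa using hf)]
        simp [mySplit]
        cases h : mySplit rest with
        | nil => exact absurd h (mySplit_ne_nil rest)
        | cons a t => simp [h]
      · have hpre : List.isPrefixOf ['$'] (c :: rest) = false := by
          simp [List.isPrefixOf]; exact fun h => absurd h.symm hc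
        simp only [hpre, Bool.false_eq_true, if_false]
        rw [ih f (c :: cur) acc (by simpa using hf)]
        simp only [mySplit, hc, if_false]
        cases h : mySplit rest with
        | nil => exact absurd h (mySplit_ne_nil rest)
        | cons a t => simp [h]

theorem splitOn_eq_mySplit (cs : List Char) : PySem.Chars.splitOn cs ['$'] = mySplit cs := by
  rw [PySem.Chars.splitOn, splitOn_go_spec cs (cs.length + 1) [] [] (by omega)]
  cases h : mySplit cs with
  | nil => exact absurd h (mySplit_ne_nil cs)
  | cons a t => simp

theorem length_mySplit (l : List Char) : (mySplit l).length = l.count '$' + 1 := by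
  induction l with
  | nil => simp [mySplit]
  | cons c rest ih =>
    by_cases hc : c = '$'
    · simp [mySplit, hc, List.count_cons, ih]
    · simp [mySplit, hc, List.count_cons, List.length_modifyHead, ih]

theorem mySplit_append (key r : List Char) (hkey : '$' ∉ key) :
    mySplit (key ++ '$' :: r) = key :: mySplit r := by
  induction key with
  | nil => simp [mySplit]
  | cons c key ih =>
    have hc : c ≠ '$' := fun h => hkey (by simp [h])
    have ih' := ih (fun h => hkey (by simp [h]))
    simp [mySplit, hc, ih']

theorem join_nil_eq_flatten (l : List (List Char)) : PySem.Chars.join [] l = l.flatten := by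
  induction l with
  | nil => simp [PySem.Chars.join, List.intercalate]
  | cons a t ih =>
    cases t with
    | nil => simp [PySem.Chars.join, List.intercalate, List.intersperse]
    | cons b u =>
      simp only [PySem.Chars.join, List.intercalate, List.intersperse] at ih ⊢
      simp [ih]

-- B's loop body viewed as structural recursion over consecutive segment pairs.
def emit (d : PySem.Dict String String) : List (List Char) → List (List Char)
  | [] => []
  | [_] => []
  | a :: b :: r => tokLookup d ('$' :: a ++ ['$']) :: b :: emit d r

theorem altLoop_eq (segs : List (List Char)) (d : PySem.Dict String String) :
    ∀ (n k : Nat) (out : List (List Char)), segs.length - k = n → k ≤ segs.length →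
    (segs.length - k) % 2 = 0 →
    altLoop segs d out k = out ++ emit d (segs.drop k) := by
  intro n
  induction n using Nat.strong_induction_on with
  | _ n ihn =>
    intro k out hn hk he
    rw [altLoop]
    by_cases hlt : k < segs.length
    · have hk1 : k + 1 < segs.length := by omega
      simp only [hlt, if_true]
      rw [ihn (segs.length - (k + 2)) (by omega) (k + 2) _ rfl (by omega) (by omega)]
      rw [List.drop_eq_getElem_cons hlt, List.drop_eq_getElem_cons hk1]
      rw [List.getD_eq_getElem segs [] hlt, List.getD_eq_getElem segs [] hk1]
      simp [emit]
    · have hk0 : k = segs.length := by omega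
      simp [hk0, List.drop_length, emit]

theorem tokenLoop_scan (cs key rest' : List Char) (d : PySem.Dict String String) (i : Nat)
    (hd : cs.drop i = '$' :: (key ++ '$' :: rest')) (hkey : '$' ∉ key) :
    ∀ (n t : Nat) (output : List (List Char)) (h : i < i + 1 + t),
    key.length - t = n → t ≤ key.length →
    tokenLoop cs d output i (i + 1 + t) h
      = tokenLoop cs d (output ++ [tokLookup d ('$' :: key ++ ['$'])])
          (i + 1 + key.length + 1) (i + 1 + key.length + 1 + 1) (by omega) := by
  have hq : ∀ m : Nat, cs[i + m]? = ('$' :: (key ++ '$' :: rest'))[m]? := by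
    intro m; rw [← List.getElem?_drop, hd]
  have hlen : cs.length = i + key.length + rest'.length + 2 := by
    have h1 := congrArg List.length hd
    have h2 : i < cs.length := by
      by_contra hle
      rw [List.drop_eq_nil_of_le (by omega)] at hd
      exact (List.cons_ne_nil _ _) hd.symm
    simp [List.length_drop] at h1
    omega
  have hi : i < cs.length := by omega
  have hgi : cs[i] = '$' := by
    have := hq 0
    simp only [Nat.add_zero, List.getElem?_cons_zero, List.getElem?_eq_getElem hi] at this
    exact Option.some_injective _ this
  intro n
  induction n using Nat.strong_induction_on with
  | _ n ihn =>
    intro t output h hn ht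
    have hj : i + 1 + t < cs.length := by omega
    have hjq : cs[i + 1 + t]? = (key ++ '$' :: rest')[t]? := by
      rw [show i + 1 + t = i + (t + 1) by omega, hq (t + 1), List.getElem?_cons_succ]
    rw [tokenLoop]
    simp only [hi, dif_pos, hgi, ne_eq, not_true_eq_false, if_false, hj]
    by_cases hts : t < key.length
    · have hv : cs[i + 1 + t] = key[t] := by
        rw [List.getElem?_append_left hts, List.getElem?_eq_getElem hts,
          List.getElem?_eq_getElem hj] at hjq
        exact Option.some_injective _ hjq
      have hne : cs[i + 1 + t] ≠ '$' := by
        rw [hv]; exact fun hh => hkey (hh ▸ List.getElem_mem hts)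
      simp only [hne, not_false_eq_true, if_true]
      exact ihn (key.length - (t + 1)) (by omega) (t + 1) output (by omega) rfl (by omega)
    · have hteq : t = key.length := by omega
      subst hteq
      have hv : cs[i + 1 + key.length] = '$' := by
        rw [List.getElem?_append_right (by omega), Nat.sub_self, List.getElem?_cons_zero,
          List.getElem?_eq_getElem hj] at hjq
        exact Option.some_injective _ hjq
      simp only [hv, not_true_eq_false, if_false]
      have hslice : PySem.List.slice cs (some (i : Int)) (some (((i + 1 + key.length : Nat) : Int) + 1))
          = '$' :: key ++ ['$'] := by
        rw [show (((i + 1 + key.length : Nat) : Int) + 1) = ((i + key.length + 2 : Nat) : Int) by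
          push_cast; ring]
        rw [PySem.List.slice_natCast, hd, show i + key.length + 2 - i = key.length + 2 by omega]
        rw [show ('$' :: (key ++ '$' :: rest')) = ('$' :: key) ++ ('$' :: rest') by simp]
        rw [List.take_append, List.take_of_length_le (by simp),
          show key.length + 2 - ('$' :: key).length = 1 by simp]
        simp
      rw [hslice]

theorem tokenLoop_join (cs : List Char) (d : PySem.Dict String String) :
    ∀ (n i : Nat) (output : List (List Char)) (h : i < i + 1), cs.length - i = n →
    (cs.drop i).count '$' % 2 = 0 →
    (tokenLoop cs d output i (i + 1) h).flatten
      = output.flatten ++ ((mySplit (cs.drop i)).headD [] :: emit d (mySplit (cs.drop i)).tail).flatten := by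
  intro n
  induction n using Nat.strong_induction_on with
  | _ n ihn =>
    intro i output h hn hcnt
    by_cases hi : i < cs.length
    · have hdrop : cs.drop i = cs[i] :: cs.drop (i + 1) := List.drop_eq_getElem_cons hi
      by_cases hc : cs[i] = '$'
      · -- token case: decompose the rest as key ++ '$' :: rest'
        set R := cs.drop (i + 1) with hR
        have hcR : R.count '$' % 2 = 1 := by
          rw [hdrop, hc] at hcnt; simp [List.count_cons] at hcnt; omega
        have hmem : '$' ∈ R := by
          by_contra hmem
          rw [List.count_eq_zero.mpr hmem] at hcR; omega
        set p : Char → Bool := fun c => c != '$' with hp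
        have hDne : R.dropWhile p ≠ [] := by
          intro hnil
          have := (List.dropWhile_eq_nil_iff.mp hnil) '$' hmem
          simp [hp] at this
        have hhead : (R.dropWhile p).head hDne = '$' := by
          have := List.head_dropWhile_not p hDne
          simp [hp] at this
          exact this
        set key := R.takeWhile p with hkeydef
        set rest' := (R.dropWhile p).tail with hrest
        have hkey : '$' ∉ key := by
          intro hm
          have := List.mem_takeWhile_imp hm
          simp [hp] at this
        have hRdec : R = key ++ '$' :: rest' := by
          rw [hkeydef, hrest, ← hhead, List.cons_head_tail hDne,
            List.takeWhile_append_dropWhile]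
        have hd : cs.drop i = '$' :: (key ++ '$' :: rest') := by
          rw [hdrop, hc, hRdec]
        have hlen : cs.length = i + key.length + rest'.length + 2 := by
          have h1 := congrArg List.length hd
          simp [List.length_drop] at h1
          omega
        have hscan := tokenLoop_scan cs key rest' d i hd hkey key.length 0 output
          (by omega) rfl (by omega)
        simp only [Nat.add_zero] at hscan
        rw [hscan]
        have hdrop2 : cs.drop (i + 1 + key.length + 1) = rest' := by
          have : cs.drop (i + 1 + key.length + 1)
              = List.drop (key.length + 2) (cs.drop i) := by
            rw [List.drop_drop]; ring_nf
          rw [this, hd]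
          rw [show ('$' :: (key ++ '$' :: rest')) = ('$' :: key ++ ['$']) ++ rest' by simp]
          rw [List.drop_append, List.drop_eq_nil_of_le (by simp),
            show key.length + 2 - ('$' :: key ++ ['$']).length = 0 by simp]
          simp
        have hcnt' : (cs.drop (i + 1 + key.length + 1)).count '$' % 2 = 0 := by
          rw [hdrop2]
          have : R.count '$' = key.count '$' + 1 + rest'.count '$' := by
            rw [hRdec]; simp [List.count_cons]; omega
          rw [List.count_eq_zero.mpr hkey] at this
          omega
        rw [ihn (cs.length - (i + 1 + key.length + 1)) (by omega) (i + 1 + key.length + 1)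
          (output ++ [tokLookup d ('$' :: key ++ ['$'])]) (by omega) rfl hcnt']
        rw [hdrop2, hd]
        rw [show ('$' :: (key ++ '$' :: rest')) = [] ++ '$' :: (key ++ '$' :: rest') by simp]
        simp only [mySplit, if_pos rfl, List.nil_append]
        rw [mySplit_append key rest' hkey]
        cases hms : mySplit rest' with
        | nil => exact absurd hms (mySplit_ne_nil rest')
        | cons h0 t0 => simp [emit]
      · -- plain character
        rw [tokenLoop]
        simp only [dif_pos hi, hc, ne_eq, not_false_eq_true, if_true]
        rw [ihn (cs.length - (i + 1)) (by omega) (i + 1) (output ++ [[cs[i]]]) (by omega) rfl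
          (by rw [hdrop, List.count_cons] at hcnt; simp [hc] at hcnt ⊢; omega)]
        rw [hdrop]
        simp only [mySplit, hc, if_false]
        cases hms : mySplit (cs.drop (i + 1)) with
        | nil => exact absurd hms (mySplit_ne_nil _)
        | cons h0 t0 => simp
    · rw [tokenLoop]
      simp only [hi, dif_neg, not_false_eq_true]
      rw [List.drop_eq_nil_of_le (by omega)]
      simp [mySplit, emit]

-- ===== VERDICT (by name: the statement is the Claim_ definition above) =====
theorem token_replace_spec : Claim_equal_token_replace := by
  intro s tokens _ hpre
  obtain ⟨hodd, -⟩ := hpre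
  rw [splitOn_eq_mySplit] at hodd
  unfold Spec_token_replace token_replace token_replace_alt
  simp only [splitOn_eq_mySplit]
  have hcnt : (s.toList.count '$') % 2 = 0 := by
    have := length_mySplit s.toList; omega
  have hA := tokenLoop_join s.toList (PySem.Dict.ofList tokens) s.toList.length 0 []
    (by omega) (by omega) (by simpa using hcnt)
  simp only [List.drop_zero, List.flatten_nil, List.nil_append] at hA
  have hlen1 : 1 ≤ (mySplit s.toList).length := by
    cases h : mySplit s.toList with
    | nil => exact absurd h (mySplit_ne_nil _)
    | cons a t => simp
  have hB := altLoop_eq (mySplit s.toList) (PySem.Dict.ofList tokens)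
    ((mySplit s.toList).length - 1) 1 [(mySplit s.toList).getD 0 []] rfl (by omega) (by omega)
  rw [join_nil_eq_flatten, join_nil_eq_flatten, hA, hB]
  cases h : mySplit s.toList with
  | nil => exact absurd h (mySplit_ne_nil _)
  | cons h0 t0 => simp
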